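-- pv_equiv track=rewrite | github.com/krux3009/investment-dashboard | src/api/_advisor_guard.py | has_forbidden
-- ===== SOURCE A (Python) =====
-- from typing import Literal
--
-- Locale = Literal["en", "zh"]
--
-- def has_forbidden(text: str, bans: tuple[str, ...], locale: Locale = "en") -> str | None:
--     """Return the first banned substring found in `text`, or None.
--
--     EN: case-insensitive substring match (mirrors analysts/_base).
--     ZH: case-insensitive substring match on the raw text — CJK has no
--     whitespace word boundary so substring is appropriate here too.
--     """
--     if not text:
--         return None
--     haystack = text.lower() if locale == "en" else text
--     for word in bans:
--         needle = word.lower() if locale == "en" else word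
--         if needle in haystack:
--             return word
--     return None
-- ===== SOURCE B (Python) =====
-- def has_forbidden(text, bans, locale="en"):
--     """Return the first banned substring found in `text`, or None.
--
--     Indexes the text once per needed pattern length: the set of all
--     length-L substrings is built on first demand, so each ban is then
--     answered by a single set lookup instead of a substring scan.
--     """
--     if not text:
--         return None
--     en = locale == "en"
--     hay = text.lower() if en else text
--     n = len(hay)
--     subs = {}
--     for word in bans:
--         needle = word.lower() if en else word
--         L = len(needle)
--         if L not in subs:
--             subs[L] = {hay[i:i + L] for i in range(n - L + 1)}
--         if needle in subs[L]:
--             return word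
--     return None
-- ===== Notes on version B (the rewrite author's own statement) =====
-- stated objective: faster
-- what changed: B replaces A's per-ban substring scan with a per-length substring index of the text (the set of all length-L slices, built on first demand and memoised in a dict), so each ban is answered by one O(1) set lookup; the text is scanned once per distinct needle length instead of once per ban.
import Mathlib
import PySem

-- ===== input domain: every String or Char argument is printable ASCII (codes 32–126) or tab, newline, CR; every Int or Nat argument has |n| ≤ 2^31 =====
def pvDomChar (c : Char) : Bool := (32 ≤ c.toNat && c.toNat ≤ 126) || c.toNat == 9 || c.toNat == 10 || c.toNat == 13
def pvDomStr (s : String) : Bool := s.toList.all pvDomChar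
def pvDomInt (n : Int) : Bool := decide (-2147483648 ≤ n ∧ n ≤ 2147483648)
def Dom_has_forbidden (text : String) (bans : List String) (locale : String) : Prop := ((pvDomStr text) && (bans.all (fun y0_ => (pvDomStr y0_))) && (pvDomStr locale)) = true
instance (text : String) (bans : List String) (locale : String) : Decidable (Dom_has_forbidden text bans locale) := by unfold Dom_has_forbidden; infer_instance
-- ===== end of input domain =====

-- B answers each ban by a set lookup in a per-length substring index of the text
-- (built on first demand per length) instead of A's per-ban substring scan (objective: faster, measured).

-- ===== PORT A =====
-- A's for-loop with early return, as structural recursion over bans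
def hasForbiddenLoopA (haystack : String) (locale : String) : List String → Option String
  | [] => none
  | word :: rest =>
    let needle := if locale = "en" then PySem.Str.lower word else word
    if PySem.Str.isIn needle haystack then some word
    else hasForbiddenLoopA haystack locale rest

def has_forbidden (text : String) (bans : List String) (locale : String) : Option String :=
  if text = "" then none
  else
    let haystack := if locale = "en" then PySem.Str.lower text else text
    hasForbiddenLoopA haystack locale bans

-- ===== PORT B =====
-- {hay[i:i+L] for i in range(n - L + 1)}  (n = len(hay))
def pvSubsOfLen (hay : String) (L : Int) : PySem.Set String :=
  PySem.Set.ofList ((PySem.List.pyRange 0 (PySem.Str.len hay - L + 1) 1).map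
    (fun i => PySem.Str.slice hay (some i) (some (i + L))))

-- B's for-loop: the memo dict `subs` maps a length L to the set of length-L substrings of hay
def pvAltLoop (hay : String) (en : Bool) : List String → PySem.Dict Int (PySem.Set String) → Option String
  | [], _ => none
  | word :: rest, subs =>
    let needle := if en then PySem.Str.lower word else word
    let L : Int := PySem.Str.len needle
    let subs' := if subs.contains L then subs else subs.insert L (pvSubsOfLen hay L)
    if PySem.Set.contains (subs'.getD L PySem.Set.empty) needle then some word
    else pvAltLoop hay en rest subs'

def has_forbidden_alt (text : String) (bans : List String) (locale : String) : Option String :=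
  if text = "" then none
  else
    let en : Bool := locale == "en"
    let hay := if en then PySem.Str.lower text else text
    pvAltLoop hay en bans PySem.Dict.empty

-- ===== PRECONDITION & SPEC =====
def Spec_has_forbidden (text : String) (bans : List String) (locale : String) (out : Option String) : Prop := out = has_forbidden_alt text bans locale
instance (text : String) (bans : List String) (locale : String) (out : Option String) : Decidable (Spec_has_forbidden text bans locale out) := by unfold Spec_has_forbidden; infer_instance

-- ===== CLAIM (what is proved, stated in full; the proofs are below) =====
def Claim_equal_has_forbidden : Prop := ∀ (text : String) (bans : List String) (locale : String), Dom_has_forbidden text bans locale → Spec_has_forbidden text bans locale (has_forbidden text bans locale)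

-- ===== LEMMAS AND PROOFS =====

-- a string is in the length-indexed substring set iff it is a substring (Python `in`)
theorem contains_pvSubsOfLen (hay needle : String) :
    PySem.Set.contains (pvSubsOfLen hay (PySem.Str.len needle)) needle
      = PySem.Str.isIn needle hay := by
  rw [Bool.eq_iff_iff, PySem.Set.contains_iff, PySem.Str.isIn_iff_infix]
  unfold pvSubsOfLen
  rw [PySem.Set.mem_ofList]
  simp only [List.mem_map, PySem.List.mem_pyRange_one, PySem.Str.len_eq]
  constructor
  · rintro ⟨i, ⟨hi0, _⟩, heq⟩
    have hin : (PySem.Str.slice hay (some i) (some (i + (needle.toList.length : Int)))).toList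
        <:+: hay.toList := by
      rw [PySem.Str.toList_slice, PySem.Chars.slice_eq_listSlice,
          PySem.List.slice_toNat _ hi0 (by omega)]
      exact (List.take_prefix _ _).isInfix.trans (List.drop_suffix _ _).isInfix
    rw [heq] at hin
    exact hin
  · intro hinf
    obtain ⟨s, t, hst⟩ := hinf
    have hlen : hay.toList.length = s.length + needle.toList.length + t.length := by
      rw [← hst]; simp; omega
    refine ⟨(s.length : Int), ⟨by omega, by omega⟩, ?_⟩
    apply String.toList_inj.mp
    rw [PySem.Str.toList_slice, PySem.Chars.slice_eq_listSlice,
        PySem.List.slice_toNat _ (by omega) (by omega)]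
    have h1 : ((s.length : Int)).toNat = s.length := by omega
    have h2 : ((s.length : Int) + (needle.toList.length : Int)).toNat - ((s.length : Int)).toNat
        = needle.toList.length := by omega
    rw [h2, h1, ← hst, List.append_assoc, List.drop_left]
    exact List.take_left' rfl

-- B's loop equals A's loop whenever every memoised entry is the substring index it claims to be
theorem pvAltLoop_eq_loopA (hay locale : String) (bans : List String)
    (subs : PySem.Dict Int (PySem.Set String))
    (hinv : ∀ L s, subs.get? L = some s → s = pvSubsOfLen hay L) :
    pvAltLoop hay (locale == "en") bans subs = hasForbiddenLoopA hay locale bans := by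
  induction bans generalizing subs with
  | nil => rfl
  | cons word rest ih =>
    simp only [pvAltLoop, hasForbiddenLoopA, beq_iff_eq]
    set needle := if locale = "en" then PySem.Str.lower word else word with hneedle
    set L : Int := PySem.Str.len needle with hL
    set subs' := if subs.contains L then subs else subs.insert L (pvSubsOfLen hay L) with hsubs'
    have hinv' : ∀ K s, subs'.get? K = some s → s = pvSubsOfLen hay K := by
      intro K s hK
      rw [hsubs'] at hK
      by_cases hc : subs.contains L
      · rw [if_pos hc] at hK; exact hinv K s hK
      · rw [if_neg hc] at hK
        by_cases hKL : K = L
        · subst hKL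
          rw [PySem.Dict.get?_insert_self] at hK
          exact (Option.some_inj.mp hK).symm
        · rw [PySem.Dict.get?_insert_of_ne _ _ hKL] at hK
          exact hinv K s hK
    have hgetD : subs'.getD L PySem.Set.empty = pvSubsOfLen hay L := by
      rw [hsubs']
      by_cases hc : subs.contains L
      · rw [if_pos hc]
        obtain ⟨s, hs⟩ : ∃ s, subs.get? L = some s := by
          cases h : subs.get? L with
          | none => rw [PySem.Dict.get?_eq_none_iff_contains] at h; rw [h] at hc; simp at hc
          | some s => exact ⟨s, rfl⟩
        rw [PySem.Dict.getD_eq_get?_getD, hs]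
        exact hinv L s hs
      · rw [if_neg hc, PySem.Dict.getD_insert]
        simp
    rw [hgetD, hL, contains_pvSubsOfLen]
    by_cases hin : PySem.Str.isIn needle hay = true
    · rw [if_pos hin, if_pos hin]
    · rw [if_neg hin, if_neg hin]
      exact ih subs' hinv'

-- ===== VERDICT (by name: the statement is the Claim_ definition above) =====
theorem has_forbidden_spec : Claim_equal_has_forbidden := by
  intro text bans locale _
  unfold Spec_has_forbidden has_forbidden has_forbidden_alt
  by_cases ht : text = ""
  · simp [ht]
  · simp only [ht, if_false]
    have : (if (locale == "en") = true then PySem.Str.lower text else text)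
        = (if locale = "en" then PySem.Str.lower text else text) := by
      simp [beq_iff_eq]
    rw [this, pvAltLoop_eq_loopA]
    intro L s h
    rw [PySem.Dict.get?_empty] at h
    exact absurd h (by simp)
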